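-- pv_equiv track=rewrite | github.com/Averylamp/s62-Final-Project | visualize.py | aggregate_info
-- ===== SOURCE A (Python) =====
-- def aggregate_info(mined_buckets):
-- 	num_buckets = len(mined_buckets)
-- 	aggregate_buckets = [0]*num_buckets
--
-- 	for i in range(num_buckets):
-- 		if i == 0:
-- 			aggregate_buckets[0] = mined_buckets[0]
-- 		else:
-- 			aggregate_buckets[i] = aggregate_buckets[i-1] + mined_buckets[i]
-- 	return aggregate_buckets
-- ===== SOURCE B (Python) =====
-- def aggregate_info(mined_buckets):
--     n = len(mined_buckets)
--     if n <= 1: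
--         return list(mined_buckets)
--     m = n // 2
--     left = aggregate_info(mined_buckets[:m])
--     right = aggregate_info(mined_buckets[m:])
--     off = left[-1]
--     return left + [off + t for t in right]
-- ===== Notes on version B (the rewrite author's own statement) =====
-- stated objective: alternative
-- what changed: Replaces the single left-to-right indexed loop with a divide-and-conquer recursion: split the list in half, compute prefix sums of each half recursively, then shift the right half's sums by the left half's total.
import Mathlib
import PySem

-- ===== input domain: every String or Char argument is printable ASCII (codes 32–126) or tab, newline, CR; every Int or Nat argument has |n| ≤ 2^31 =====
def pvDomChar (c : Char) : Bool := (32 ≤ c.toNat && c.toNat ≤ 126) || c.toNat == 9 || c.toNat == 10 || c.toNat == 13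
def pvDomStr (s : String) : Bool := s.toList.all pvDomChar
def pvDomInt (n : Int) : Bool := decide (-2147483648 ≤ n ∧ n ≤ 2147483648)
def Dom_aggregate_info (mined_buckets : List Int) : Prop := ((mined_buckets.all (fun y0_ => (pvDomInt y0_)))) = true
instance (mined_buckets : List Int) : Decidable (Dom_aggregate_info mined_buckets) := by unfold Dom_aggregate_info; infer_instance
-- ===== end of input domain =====

-- B: divide-and-conquer prefix sums (split in half, recurse, shift the right half's
-- sums by the left half's total) instead of A's indexed left-to-right loop. Same result.

theorem pvFloordiv2 (n : Nat) : PySem.Int.floordiv (n : Int) 2 = ((n / 2 : Nat) : Int) := by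
  exact_mod_cast PySem.Int.floordiv_natCast n 2

-- ===== PORT A =====
def aggregate_info (mined_buckets : List Int) : List Int :=
  let num_buckets : Int := mined_buckets.length
  let aggregate_buckets : List Int := List.replicate mined_buckets.length 0
  (PySem.List.pyRange 0 num_buckets 1).foldl (fun buf i =>
    if i == 0 then
      PySem.List.pySetD buf 0 (PySem.List.pyGetD mined_buckets 0 0)
    else
      PySem.List.pySetD buf i (PySem.List.pyGetD buf (i - 1) 0 + PySem.List.pyGetD mined_buckets i 0))
    aggregate_buckets

-- ===== PORT B =====
-- transliterates Source B: n = len, n <= 1 -> copy; m = n // 2; recurse on xs[:m], xs[m:];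
-- off = left[-1]; return left + [off + t for t in right]
-- (left[-1] is pyGetD with default 0; the default is never read, left is nonempty there)
def aggregate_info_alt (mined_buckets : List Int) : List Int :=
  let n : Int := mined_buckets.length
  if n ≤ 1 then mined_buckets
  else
    let m : Int := PySem.Int.floordiv n 2
    let left := aggregate_info_alt (PySem.List.slice mined_buckets none (some m))
    let right := aggregate_info_alt (PySem.List.slice mined_buckets (some m) none)
    let off := PySem.List.pyGetD left (-1) 0
    left ++ right.map (fun t => off + t)
termination_by mined_buckets.length
decreasing_by
  all_goals
    rename_i h
    simp only [pvFloordiv2, PySem.List.slice_to_natCast, PySem.List.slice_from_natCast,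
      List.length_take, List.length_drop]
    omega

-- ===== PRECONDITION & SPEC =====
def Spec_aggregate_info (mined_buckets : List Int) (out : List Int) : Prop := out = aggregate_info_alt mined_buckets
instance (mined_buckets : List Int) (out : List Int) : Decidable (Spec_aggregate_info mined_buckets out) := by unfold Spec_aggregate_info; infer_instance

-- ===== CLAIM (what is proved, stated in full; the proofs are below) =====
def Claim_equal_aggregate_info : Prop := ∀ (mined_buckets : List Int), Dom_aggregate_info mined_buckets → Spec_aggregate_info mined_buckets (aggregate_info mined_buckets)

-- ===== LEMMAS AND PROOFS =====

-- running prefix sums starting from total t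
def pvScan (t : Int) : List Int → List Int
  | [] => []
  | x :: r => (t + x) :: pvScan (t + x) r

theorem pvScan_length (t : Int) (xs : List Int) : (pvScan t xs).length = xs.length := by
  induction xs generalizing t with
  | nil => rfl
  | cons x r ih => simp [pvScan, ih]

theorem pvScan_take_succ (xs : List Int) (t : Int) (k : Nat) (hk : k < xs.length) :
    pvScan t (xs.take (k + 1)) = pvScan t (xs.take k) ++ [t + (xs.take (k + 1)).sum] := by
  induction xs generalizing t k with
  | nil => simp at hk
  | cons x r ih =>
    cases k with
    | zero => simp [pvScan]
    | succ k =>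
      simp only [List.take_succ_cons, pvScan, List.sum_cons]
      rw [ih (t + x) k (by simpa using hk)]
      simp [add_assoc]

theorem pvScan_getD (xs : List Int) (t : Int) (h : xs ≠ []) :
    (pvScan t xs).getD (xs.length - 1) 0 = t + xs.sum := by
  induction xs generalizing t with
  | nil => exact absurd rfl h
  | cons x r ih =>
    cases r with
    | nil => simp [pvScan]
    | cons y s =>
      have := ih (t := t + x) (by simp)
      simp only [pvScan, List.length_cons, List.sum_cons, Nat.add_sub_cancel,
        List.getD_cons_succ] at this ⊢
      rw [this]; ring

theorem pvScan_append (t : Int) (l r : List Int) :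
    pvScan t (l ++ r) = pvScan t l ++ pvScan (t + l.sum) r := by
  induction l generalizing t with
  | nil => simp [pvScan]
  | cons x l ih => simp [pvScan, ih, add_assoc]

theorem pvScan_shift (a : Int) (xs : List Int) :
    pvScan a xs = (pvScan 0 xs).map (fun t => a + t) := by
  induction xs generalizing a with
  | nil => simp [pvScan]
  | cons x r ih =>
    simp only [pvScan, List.map_cons, zero_add]
    congr 1
    rw [ih (a + x), ih x, List.map_map]
    congr 1; funext t; simp; ring

theorem pvScan_getLast (t : Int) (xs : List Int) (h : xs ≠ []) :
    (pvScan t xs).getLast (by cases xs with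
      | nil => exact absurd rfl h
      | cons x r => simp [pvScan]) = t + xs.sum := by
  induction xs generalizing t with
  | nil => exact absurd rfl h
  | cons x r ih =>
    cases r with
    | nil => simp [pvScan]
    | cons y s =>
      have := ih (t := t + x) (by simp)
      simp only [pvScan, List.sum_cons] at this ⊢
      rw [List.getLast_cons (by simp), this]; ring

theorem alt_eq_scan (xs : List Int) : aggregate_info_alt xs = pvScan 0 xs := by
  rw [aggregate_info_alt]
  by_cases h : (xs.length : Int) ≤ 1
  · rw [if_pos h]
    cases xs with
    | nil => simp [pvScan]
    | cons x r =>
      cases r with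
      | nil => simp [pvScan]
      | cons y s => simp at h; omega
  · rw [if_neg h]
    have h2 : 2 ≤ xs.length := by omega
    simp only [pvFloordiv2, PySem.List.slice_to_natCast, PySem.List.slice_from_natCast]
    set m := xs.length / 2 with hmdef
    have hm1 : 1 ≤ m := by omega
    have hmlt : m < xs.length := by omega
    have hl : (xs.take m).length = m := by rw [List.length_take]; omega
    have htk : xs.take m ≠ [] := by
      intro hc; rw [hc] at hl; simp at hl; omega
    rw [alt_eq_scan (xs.take m), alt_eq_scan (xs.drop m)]
    have hlast : PySem.List.pyGetD (pvScan 0 (xs.take m)) (-1) 0 = (xs.take m).sum := by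
      have hne : pvScan 0 (xs.take m) ≠ [] := by
        intro hc; have := congrArg List.length hc
        rw [pvScan_length, hl] at this; simp at this; omega
      rw [PySem.List.pyGetD_neg_one _ _ hne, pvScan_getLast 0 _ htk, zero_add]
    rw [hlast, ← pvScan_shift, show ((xs.take m).sum) = 0 + (xs.take m).sum by ring,
      ← pvScan_append, List.take_append_drop]
termination_by xs.length
decreasing_by
  all_goals simp only [List.length_take, List.length_drop]; omega

theorem pv_sum_take_succ (xs : List Int) (k : Nat) (h : k < xs.length) :
    (xs.take (k + 1)).sum = (xs.take k).sum + xs[k] := by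
  induction xs generalizing k with
  | nil => simp at h
  | cons x r ih =>
    cases k with
    | zero => simp
    | succ k =>
      simp only [List.take_succ_cons, List.sum_cons, List.getElem_cons_succ]
      rw [ih k (by simpa using h)]
      ring

-- the step function of A's loop
def pvStepA (xs : List Int) (buf : List Int) (i : Int) : List Int :=
  if i == 0 then
    PySem.List.pySetD buf 0 (PySem.List.pyGetD xs 0 0)
  else
    PySem.List.pySetD buf i (PySem.List.pyGetD buf (i - 1) 0 + PySem.List.pyGetD xs i 0)

-- loop invariant for A: after the first k iterations the buffer holds the first k prefix
-- sums followed by the untouched zeros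
theorem a_inv (xs : List Int) (k : Nat) (hk : k ≤ xs.length) :
    (PySem.List.pyRange 0 (k : Int) 1).foldl (pvStepA xs) (List.replicate xs.length 0)
      = pvScan 0 (xs.take k) ++ List.replicate (xs.length - k) 0 := by
  induction k with
  | zero =>
    simp [pvScan, PySem.List.pyRange_one_eq_nil (le_refl (0 : Int))]
  | succ k ih =>
    have hk' : k ≤ xs.length := Nat.le_of_succ_le hk
    have hklt : k < xs.length := hk
    have hsplit : PySem.List.pyRange 0 ((k : Int) + 1) 1
        = PySem.List.pyRange 0 (k : Int) 1 ++ [(k : Int)] :=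
      PySem.List.pyRange_one_succ_right (by exact_mod_cast Nat.zero_le k)
    rw [show ((k + 1 : Nat) : Int) = (k : Int) + 1 by push_cast; ring, hsplit,
        List.foldl_append, ih hk']
    simp only [List.foldl_cons, List.foldl_nil]
    cases k with
    | zero =>
      obtain ⟨x, r, rfl⟩ : ∃ x r, xs = x :: r := by
        cases xs with
        | nil => simp at hklt
        | cons x r => exact ⟨x, r, rfl⟩
      simp [pvStepA, pvScan, PySem.List.pySetD_of_nonneg, PySem.List.pyGetD_zero_cons,
        List.replicate_succ]
    | succ k =>
      simp only [Nat.cast_add, Nat.cast_one] at *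
      rw [pvStepA, if_neg (by simp only [beq_iff_eq]; omega)]
      have hkk : (k : Nat) + 1 < xs.length := hklt
      have hlen : (pvScan 0 (xs.take (k + 1))).length = k + 1 := by
        rw [pvScan_length, List.length_take]; omega
      have htake_ne : xs.take (k + 1) ≠ [] := by
        intro h; have := congrArg List.length h
        simp only [List.length_take, List.length_nil] at this; omega
      -- the read of buf[i-1]
      have hget : PySem.List.pyGetD
          (pvScan 0 (xs.take (k + 1)) ++ List.replicate (xs.length - (k + 1)) 0)
          ((k : Int) + 1 - 1) 0 = (xs.take (k + 1)).sum := by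
        rw [show ((k : Int) + 1 - 1) = ((k : Nat) : Int) by ring,
            PySem.List.pyGetD_natCast]
        rw [List.getD_append _ _ _ _ (by omega)]
        have := pvScan_getD (xs.take (k + 1)) 0 htake_ne
        rw [List.length_take] at this
        simpa [show min (k + 1) xs.length - 1 = k by omega] using this
      rw [hget]
      -- the read of xs[i]
      have hxs : PySem.List.pyGetD xs ((k : Int) + 1) 0 = xs.getD (k + 1) 0 := by
        rw [show ((k : Int) + 1) = (((k : Nat) + 1 : Nat) : Int) by push_cast; ring,
            PySem.List.pyGetD_natCast]
      rw [hxs, List.getD_eq_getElem _ _ hkk]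
      -- the write
      rw [show ((k : Int) + 1) = (((k : Nat) + 1 : Nat) : Int) by push_cast; ring,
          PySem.List.pySetD_natCast]
      rw [pvScan_take_succ xs 0 (k + 1) hkk]
      have hrep : xs.length - (k + 1) = (xs.length - (k + 2)) + 1 := by omega
      rw [hrep, List.replicate_succ]
      rw [List.set_append_right _ _ (by omega : (pvScan 0 (xs.take (k + 1))).length ≤ k + 1)]
      rw [List.append_assoc]
      congr 1
      simp only [hlen, Nat.sub_self, List.set_cons_zero, List.singleton_append, List.cons.injEq,
        zero_add, and_true]
      rw [pv_sum_take_succ xs (k + 1) hkk]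

theorem a_eq_scan (xs : List Int) : aggregate_info xs = pvScan 0 xs := by
  show (PySem.List.pyRange 0 (xs.length : Int) 1).foldl (pvStepA xs) (List.replicate xs.length 0)
      = pvScan 0 xs
  rw [a_inv xs xs.length (le_refl _)]
  simp

-- ===== VERDICT (by name: the statement is the Claim_ definition above) =====
theorem aggregate_info_spec : Claim_equal_aggregate_info := by
  intro xs _
  show aggregate_info xs = aggregate_info_alt xs
  rw [a_eq_scan, alt_eq_scan]
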